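-- pv_equiv track=rewrite | github.com/JoaoPMarto/IntroductionToArtificialIntelligence | Project1/puzzleColares.py | goal_tester
-- ===== SOURCE A (Python) =====
-- def goal_tester(colar):
--     cores = [colar[0]]
--     y = colar[0]
--     aux = False
--     for x in colar[1:]:
--         if (cores[0] == x) & (y != x):
--             aux = True
--         if aux:
--             if x != cores[0]:
--                 return False
--         if (x in cores) & (y != x) & (not aux):
--             return False
--         if not x in cores:
--             cores.append(x)
--             y = x
--     return True
-- ===== SOURCE B (Python) =====
-- def goal_tester(colar):
--     first = colar[0]
--     runs = [first]
--     for x in colar[1:]: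
--         if x != runs[-1]:
--             runs.append(x)
--     if len(runs) > 1 and runs[-1] == runs[0]:
--         runs.pop()
--     return len(set(runs)) == len(runs)
-- ===== Notes on version B (the rewrite author's own statement) =====
-- stated objective: faster
-- what changed: Replaces A's flag/branch single pass (cores list with repeated linear membership scans, y, aux flag, three early-return branches) with a two-phase strategy: run-length-compress the necklace, drop the last run if it wraps to the first, and return whether the run colors are all distinct via a set.
import Mathlib
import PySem

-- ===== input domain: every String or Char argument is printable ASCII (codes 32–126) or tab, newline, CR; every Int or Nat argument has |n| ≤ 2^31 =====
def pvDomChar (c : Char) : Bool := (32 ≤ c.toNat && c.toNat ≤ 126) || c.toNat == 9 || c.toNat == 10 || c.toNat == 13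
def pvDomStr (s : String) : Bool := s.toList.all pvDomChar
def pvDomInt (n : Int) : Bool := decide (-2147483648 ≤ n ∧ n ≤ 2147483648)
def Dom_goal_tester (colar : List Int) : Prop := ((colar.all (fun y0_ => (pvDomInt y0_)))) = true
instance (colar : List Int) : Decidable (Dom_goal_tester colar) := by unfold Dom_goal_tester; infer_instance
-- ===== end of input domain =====

-- B replaces A's flag/branch single pass by run-length compression + circular-wrap fix +
-- distinctness check, removing the repeated linear membership scans (measured faster). A raises IndexError on [], excluded by Pre_.


-- ===== PORT A =====
-- the for-loop of A, state (cores, y, aux); cores is always nonempty, so cores.headD 0 = cores[0];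
-- 'if cond: aux = True' is ported as 'aux := cond || aux'
def goalLoopA (cores : List Int) (y : Int) (aux : Bool) : List Int → Bool
  | [] => true
  | x :: rest =>
    let aux2 := ((cores.headD 0 == x) && (y != x)) || aux
    if aux2 && (x != cores.headD 0) then false
    else if cores.contains x && (y != x) && !aux2 then false
    else if !(cores.contains x) then goalLoopA (cores ++ [x]) x aux2 rest
    else goalLoopA cores y aux2 rest

def goal_tester (colar : List Int) : Bool :=
  match colar with
  | [] => false  -- Python raises IndexError on colar[0]; excluded by Pre_goal_tester
  | c0 :: rest => goalLoopA [c0] c0 false rest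

-- ===== PORT B =====
def goal_tester_alt (colar : List Int) : Bool :=
  match colar with
  | [] => false  -- Python raises IndexError on colar[0]; excluded by Pre_goal_tester
  | first :: rest =>
    let runs := rest.foldl (fun rs x => if x != rs.getLast! then rs ++ [x] else rs) [first]
    let runs := if runs.length > 1 && (runs.getLast! == runs.headD 0) then runs.dropLast else runs
    PySem.Set.len (PySem.Set.ofList runs) == (runs.length : Int)

-- ===== PRECONDITION & SPEC =====
-- Pre_ excludes only the empty list, on which A raises IndexError (colar[0]).
def Pre_goal_tester (colar : List Int) : Prop := colar ≠ []
instance (colar : List Int) : Decidable (Pre_goal_tester colar) := by unfold Pre_goal_tester; infer_instance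
def pvWitness_goal_tester : List Int := [1, 2, 2, 1]

def Spec_goal_tester (colar : List Int) (out : Bool) : Prop := out = goal_tester_alt colar
instance (colar : List Int) (out : Bool) : Decidable (Spec_goal_tester colar out) := by unfold Spec_goal_tester; infer_instance

-- ===== CLAIM (what is proved, stated in full; the proofs are below) =====
def Claim_equal_goal_tester : Prop := ∀ (colar : List Int), Dom_goal_tester colar → Pre_goal_tester colar → Spec_goal_tester colar (goal_tester colar)

-- ===== LEMMAS AND PROOFS =====

-- run-length compression of a list relative to the previous color (proof helper)
def compress (prev : Int) : List Int → List Int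
  | [] => []
  | x :: rest => if x = prev then compress prev rest else x :: compress x rest

-- a recursive characterisation of A's loop on the compressed run list (proof helper)
def ok (acc : List Int) (c0 : Int) : List Int → Bool
  | [] => true
  | r :: rtl =>
    if r = c0 then decide (rtl = [])
    else !(acc.contains r) && ok (acc ++ [r]) c0 rtl

-- B's final check, with Nodup in place of the len(set(..)) test
def bCheck (runs : List Int) : Bool :=
  decide (if runs.length > 1 && (runs.getLast! == runs.headD 0) then runs.dropLast.Nodup else runs.Nodup)

theorem glb_concat (l : List Int) (x : Int) : (l ++ [x]).getLast! = x := by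
  simp [List.getLast!_eq_getLast?_getD]

theorem glb_mem (l : List Int) (h : l ≠ []) : l.getLast! ∈ l := by
  simp only [List.getLast!_eq_getLast?_getD]
  cases hl : l.getLast? with
  | none => exact absurd (List.getLast?_eq_none_iff.mp hl) h
  | some a => simpa using List.mem_of_getLast? hl

theorem headD_mem (l : List Int) (h : l ≠ []) : l.headD 0 ∈ l := by
  cases l with
  | nil => exact absurd rfl h
  | cons c cs => simp

theorem headD_append (l l' : List Int) (h : l ≠ []) : (l ++ l').headD 0 = l.headD 0 := by
  cases l with
  | nil => exact absurd rfl h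
  | cons c cs => simp

theorem nodup_concat (l : List Int) (x : Int) (hnd : l.Nodup) (hx : x ∉ l) :
    (l ++ [x]).Nodup := by
  rw [List.nodup_append]
  refine ⟨hnd, by simp, ?_⟩
  intro a ha b hb
  simp only [List.mem_singleton] at hb
  subst hb
  exact fun e => hx (e ▸ ha)

theorem foldl_runs (rest acc : List Int) (h : acc ≠ []) :
    rest.foldl (fun rs x => if x != rs.getLast! then rs ++ [x] else rs) acc
      = acc ++ compress acc.getLast! rest := by
  induction rest generalizing acc with
  | nil => simp [compress]
  | cons x rest ih =>
    rw [List.foldl_cons, compress]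
    by_cases hx : x = acc.getLast!
    · rw [if_neg (by simp [hx, -List.getLast!_eq_getLast?_getD]), if_pos hx, ih acc h]
    · rw [if_pos (by simp [hx, -List.getLast!_eq_getLast?_getD]), if_neg hx,
        ih (acc ++ [x]) (by simp), glb_concat, List.append_assoc, List.singleton_append]

-- the 'aux = True' state of A's loop: the remaining elements must all equal cores[0]
theorem loopA_aux (tail : List Int) (cores : List Int) (y : Int) (h : cores ≠ []) :
    goalLoopA cores y true tail = tail.all (fun x => x == cores.headD 0) := by
  induction tail generalizing y with
  | nil => simp [goalLoopA]
  | cons x tail ih =>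
    simp only [goalLoopA, Bool.or_true, Bool.true_and, Bool.not_true, Bool.and_false,
      if_neg (Bool.false_ne_true), List.all_cons]
    by_cases hx : x = cores.headD 0
    · have hcm : x ∈ cores := hx ▸ headD_mem cores h
      have hc : cores.contains x = true := by simpa using hcm
      rw [if_neg (by simp [hx, -List.headD_eq_head?_getD]), hc, Bool.not_true,
        if_neg (Bool.false_ne_true), ih]
      simp [hx, -List.headD_eq_head?_getD]
    · rw [if_pos (by simp [hx, -List.headD_eq_head?_getD])]
      simp [hx, -List.headD_eq_head?_getD]

-- main loop invariant: A's loop equals 'ok' on the compressed remainder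
theorem loopA_ok (rest : List Int) (cores : List Int) (y : Int)
    (hne : cores ≠ []) (hnd : cores.Nodup) (hy : cores.getLast! = y) :
    goalLoopA cores y false rest = ok cores (cores.headD 0) (compress y rest) := by
  induction rest generalizing cores y with
  | nil => simp [goalLoopA, compress, ok]
  | cons x rest ih =>
    have hyc : y ∈ cores := hy ▸ glb_mem cores hne
    simp only [goalLoopA, Bool.or_false, compress]
    by_cases hxy : x = y
    · subst hxy
      have hc : cores.contains x = true := by simpa using hyc
      rw [if_pos rfl, show ((cores.headD 0 == x) && (x != x)) = false from by simp, hc]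
      simp only [Bool.false_and, if_neg (Bool.false_ne_true), bne_self_eq_false,
        Bool.and_false, Bool.not_true]
      exact ih cores x hne hnd hy
    · rw [if_neg hxy]
      by_cases hx0 : x = cores.headD 0
      · -- wrap back to the first color: aux becomes true
        have hcm : x ∈ cores := hx0 ▸ headD_mem cores hne
        have hc : cores.contains x = true := by simpa using hcm
        rw [show ((cores.headD 0 == x) && (y != x)) = true from by
              rw [← hx0]; simp [bne_iff_ne, Ne.symm hxy],
          hc]
        simp only [Bool.true_and, Bool.not_true, Bool.and_false]
        rw [if_neg (show ¬ ((x != cores.headD 0) = true) from by rw [← hx0]; simp),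
          if_neg (Bool.false_ne_true), if_neg (by simp), loopA_aux rest cores y hne]
        simp only [ok, if_pos hx0]
        -- tail.all (= c0)  ↔  compress x tail = []
        clear ih hcm hc hy hyc
        induction rest with
        | nil => simp [compress]
        | cons z zs ihz =>
          simp only [List.all_cons, compress]
          by_cases hz : z = x
          · simpa [hz, hx0, -List.headD_eq_head?_getD] using ihz
          · have hz0 : ¬ z = cores.headD 0 := by rw [← hx0]; exact hz
            simp [hz, hz0, -List.headD_eq_head?_getD]
      · -- x is a genuinely different, non-first color
        have haux : ((cores.headD 0 == x) && (y != x)) = false := by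
          simp [Ne.symm hx0, -List.headD_eq_head?_getD]
        rw [haux]
        simp only [Bool.false_and, if_neg (Bool.false_ne_true), Bool.not_false, Bool.and_true]
        by_cases hc : x ∈ cores
        · -- revisit of an old color: A returns False, ok is false
          have hct : cores.contains x = true := by simpa using hc
          rw [hct, if_pos (by simp [bne_iff_ne, Ne.symm hxy])]
          simp [ok, hx0, hc, -List.headD_eq_head?_getD]
        · have hcf : cores.contains x = false := by simpa using hc
          rw [hcf]
          simp only [Bool.false_and, if_neg (Bool.false_ne_true), Bool.not_false]
          rw [ih (cores ++ [x]) x (by simp) (nodup_concat cores x hnd hc)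
              (glb_concat cores x),
            headD_append cores [x] hne]
          conv_rhs => rw [ok]
          rw [if_neg hx0, hcf, Bool.not_false, Bool.true_and]
          exact if_pos trivial

-- 'ok' equals B's wrap-fix + Nodup check on acc ++ rs
theorem ok_bCheck (rs acc : List Int) (hne : acc ≠ []) (hnd : acc.Nodup) :
    ok acc (acc.headD 0) rs = bCheck (acc ++ rs) := by
  induction rs generalizing acc with
  | nil =>
    simp only [ok, bCheck, List.append_nil]
    rw [eq_comm, Bool.eq_iff_iff]
    simp only [decide_eq_true_iff]
    constructor
    · intro _; trivial
    · intro _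
      split
      · exact (List.dropLast_sublist acc).nodup hnd
      · exact hnd
  | cons r rtl ih =>
    have h0 : acc.headD 0 ∈ acc := headD_mem acc hne
    have hh : (acc ++ r :: rtl).headD 0 = acc.headD 0 := headD_append acc (r :: rtl) hne
    simp only [ok]
    by_cases hr : r = acc.headD 0
    · rw [if_pos hr]
      cases rtl with
      | nil =>
        have hlast : (acc ++ [r]).getLast! = r := glb_concat acc r
        have hlen : 1 < (acc ++ [r]).length := by
          cases acc with
          | nil => exact absurd rfl hne
          | cons c cs => simp
        have hcond : (decide ((acc ++ [r]).length > 1) &&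
            ((acc ++ [r]).getLast! == (acc ++ [r]).headD 0)) = true := by
          rw [hlast, headD_append acc [r] hne]
          simp [hr, -List.headD_eq_head?_getD, List.length_pos_of_ne_nil hne]
        rw [Bool.eq_iff_iff]
        simp only [bCheck, decide_eq_true_iff]
        rw [if_pos (by exact_mod_cast hcond)]
        rw [List.dropLast_concat]
        simp [hnd]
      | cons z zs =>
        -- duplicate of acc's head survives any wrap drop → not Nodup
        rw [Bool.eq_iff_iff]
        simp only [bCheck, decide_eq_true_iff]
        constructor
        · intro hfalse; exact absurd hfalse (by simp)
        · intro hnod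
          exfalso
          revert hnod
          split
          · intro hnod
            rw [List.dropLast_append_of_ne_nil (by simp), List.nodup_append] at hnod
            refine hnod.2.2 _ h0 (acc.headD 0) ?_ rfl
            rw [show (r :: z :: zs).dropLast = r :: (z :: zs).dropLast from by simp]
            exact List.mem_cons.mpr (Or.inl hr.symm)
          · intro hnod
            rw [List.nodup_append] at hnod
            exact hnod.2.2 _ h0 (acc.headD 0) (List.mem_cons.mpr (Or.inl hr.symm)) rfl
    · rw [if_neg hr]
      by_cases hc : r ∈ acc
      · -- old color revisited: a duplicate of r survives any wrap drop
        have hct : acc.contains r = true := by simpa using hc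
        rw [hct, Bool.not_true, Bool.false_and, Bool.eq_iff_iff]
        simp only [bCheck, decide_eq_true_iff]
        constructor
        · intro hfalse; exact absurd hfalse (by simp)
        · intro hnod
          exfalso
          revert hnod
          split
          · rename_i hcond
            cases rtl with
            | nil =>
              exfalso
              rw [glb_concat, headD_append acc [r] hne] at hcond
              exact hr (by simpa using ((Bool.and_eq_true _ _).mp hcond).2)
            | cons z zs =>
              intro hnod
              rw [List.dropLast_append_of_ne_nil (by simp), List.nodup_append] at hnod
              refine hnod.2.2 _ hc r ?_ rfl
              rw [show (r :: z :: zs).dropLast = r :: (z :: zs).dropLast from by simp]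
              exact List.mem_cons.mpr (Or.inl rfl)
          · intro hnod
            rw [List.nodup_append] at hnod
            exact hnod.2.2 _ hc r (List.mem_cons.mpr (Or.inl rfl)) rfl
      · have hcf : acc.contains r = false := by simpa using hc
        rw [hcf, Bool.not_false, Bool.true_and,
          ← headD_append acc [r] hne,
          ih (acc ++ [r]) (by simp) (nodup_concat acc r hnd hc),
          List.append_assoc, List.singleton_append]

theorem foldl_add_len_le (l s : List Int) :
    (l.foldl PySem.Set.add s).length ≤ s.length + l.length := by
  induction l generalizing s with
  | nil => simp
  | cons x tl ih =>
    rw [List.foldl_cons]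
    refine le_trans (ih _) ?_
    have hadd : (PySem.Set.add s x).length ≤ s.length + 1 := by
      rw [PySem.Set.add]
      split
      · omega
      · simp
    simp only [List.length_cons]
    omega

theorem foldl_add_len_eq_iff (l s : List Int) :
    (l.foldl PySem.Set.add s).length = s.length + l.length ↔ (l.Nodup ∧ ∀ x ∈ l, x ∉ s) := by
  induction l generalizing s with
  | nil => simp
  | cons x tl ih =>
    rw [List.foldl_cons, PySem.Set.add]
    by_cases hx : PySem.Set.contains s x = true
    · rw [if_pos hx]
      have hle := foldl_add_len_le tl s
      have hxs : x ∈ s := by simpa [PySem.Set.contains] using hx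
      constructor
      · intro h; simp only [List.length_cons] at h; omega
      · rintro ⟨-, hall⟩
        exact absurd hxs (hall x (by simp))
    · rw [if_neg hx,
        show s.length + (x :: tl).length = (s ++ [x]).length + tl.length from by
          simp [List.length_append]; omega,
        ih (s ++ [x])]
      have hxs : x ∉ s := by simpa [PySem.Set.contains] using hx
      constructor
      · rintro ⟨hnd, hall⟩
        refine ⟨List.nodup_cons.mpr ⟨fun hm => by simpa using hall x hm, hnd⟩, ?_⟩
        intro z hz
        rcases List.mem_cons.mp hz with h | h
        · exact h ▸ hxs
        · intro hzs; exact (hall z h) (by simp [hzs])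
      · rintro ⟨hnd, hall⟩
        rcases List.nodup_cons.mp hnd with ⟨hxtl, hnd'⟩
        refine ⟨hnd', ?_⟩
        intro z hz hzm
        rcases List.mem_append.mp hzm with h | h
        · exact hall z (by simp [hz]) h
        · simp only [List.mem_singleton] at h; exact hxtl (h ▸ hz)

-- B's final 'len(set(runs)) == len(runs)' is the Nodup test
theorem set_len_nodup (l : List Int) :
    ((PySem.Set.len (PySem.Set.ofList l) == (l.length : Int)) : Bool) = decide l.Nodup := by
  have h := foldl_add_len_eq_iff l []
  simp only [List.length_nil, Nat.zero_add, List.not_mem_nil, not_false_iff, implies_true,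
    and_true] at h
  rw [Bool.eq_iff_iff]
  simp only [PySem.Set.len, PySem.Set.ofList, PySem.Set.empty, beq_iff_eq, Nat.cast_inj,
    decide_eq_true_iff]
  exact h

-- ===== VERDICT (by name: the statement is the Claim_ definition above) =====
theorem goal_tester_spec : Claim_equal_goal_tester := by
  intro colar _ hpre
  cases colar with
  | nil => exact absurd rfl hpre
  | cons c0 rest =>
    show goal_tester (c0 :: rest) = goal_tester_alt (c0 :: rest)
    have hgl : ([c0] : List Int).getLast! = c0 := by
      simp [List.getLast!_eq_getLast?_getD]
    simp only [goal_tester, goal_tester_alt]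
    rw [foldl_runs rest [c0] (by simp), hgl,
      loopA_ok rest [c0] c0 (by simp) (by simp) hgl,
      ok_bCheck (compress c0 rest) [c0] (by simp) (by simp),
      set_len_nodup, bCheck]
    rw [decide_eq_decide]
    split <;> exact Iff.rfl
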